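-- pv_equiv track=rewrite | github.com/yangyuan16/QC-alpha-circuit | library/circuit.py | circjob_count_3q
-- ===== SOURCE A (Python) =====
-- def circjob_count_3q(counts):
--     count_000 = []
--     count_100 = []
--     count_010 = []
--     count_110 = []
--     count_001 = []
--     count_101 = []
--     count_011 = []
--     count_111 = []
--     for it in range(len(counts)):
--         if '000' in counts[it]:
--             count_000.append(counts[it]['000'])
--         else:
--             count_000.append(0)
--         if '100' in counts[it]:
--             count_100.append(counts[it]['100'])
--         else:
--             count_100.append(0)
--         if '010' in counts[it]:
--             count_010.append(counts[it]['010'])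
--         else:
--             count_010.append(0)
--         if '110' in counts[it]:
--             count_110.append(counts[it]['110'])
--         else:
--             count_110.append(0)
--         if '001' in counts[it]:
--             count_001.append(counts[it]['001'])
--         else:
--             count_001.append(0)
--         if '101' in counts[it]:
--             count_101.append(counts[it]['101'])
--         else:
--             count_101.append(0)
--         if '011' in counts[it]:
--             count_011.append(counts[it]['011'])
--         else:
--             count_011.append(0)
--         if '111' in counts[it]:
--             count_111.append(counts[it]['111'])
--         else:
--             count_111.append(0)
--     return count_000, count_100, count_010, count_110, count_001,count_101,count_011,count_111
-- ===== SOURCE B (Python) =====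
-- def circjob_count_3q(counts):
--     # Scatter-then-transpose: decode each dict's own keys as reversed-binary
--     # indices into a fixed 8-slot row, then read the 8 columns off the rows.
--     def row_of(d):
--         row = [0] * 8
--         for k, v in d.items():
--             if len(k) == 3 and set(k) <= {'0', '1'}:
--                 row[int(k[::-1], 2)] = v
--         return row
--     rows = [row_of(d) for d in counts]
--     return tuple([r[j] for r in rows] for j in range(8))
-- ===== Notes on version B (the rewrite author's own statement) =====
-- stated objective: alternative
-- what changed: Inverts the data flow: instead of probing 8 fixed keys in each dict, B iterates over each dict's own items, decodes every valid bitstring key as a reversed-binary index int(k[::-1],2) scattered into a preallocated 8-slot row, and then transposes the rows into the 8 columns.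
import Mathlib
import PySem

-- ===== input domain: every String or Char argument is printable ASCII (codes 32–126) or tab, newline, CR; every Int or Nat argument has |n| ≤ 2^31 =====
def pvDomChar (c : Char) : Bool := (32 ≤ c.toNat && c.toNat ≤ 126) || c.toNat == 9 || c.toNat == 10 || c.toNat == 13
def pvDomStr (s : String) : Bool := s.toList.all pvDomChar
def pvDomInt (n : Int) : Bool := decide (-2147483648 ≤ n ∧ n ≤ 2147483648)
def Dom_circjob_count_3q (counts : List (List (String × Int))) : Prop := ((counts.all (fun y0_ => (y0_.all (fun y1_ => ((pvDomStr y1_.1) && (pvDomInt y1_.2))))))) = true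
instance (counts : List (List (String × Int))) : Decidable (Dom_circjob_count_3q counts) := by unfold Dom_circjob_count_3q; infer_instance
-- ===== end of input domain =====

-- B replaces A's probe-8-fixed-keys-per-dict pass by a scatter/transpose algorithm:
-- each dict's OWN items are decoded as reversed-binary indices into a fixed 8-slot row,
-- then the 8 columns are read off the rows; alternative decomposition, return value only.

-- ===== PORT A =====
-- one loop iteration of A: conditionally append each of the 8 keys' counts
def pvStepA (acc : List Int × List Int × List Int × List Int × List Int × List Int × List Int × List Int)
    (dl : List (String × Int)) : List Int × List Int × List Int × List Int × List Int × List Int × List Int × List Int :=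
  let d := PySem.Dict.ofList dl
  let app := fun (k : String) (l : List Int) =>
    if d.contains k then l ++ [d.getD k 0] else l ++ [0]
  match acc with
  | (c000, c100, c010, c110, c001, c101, c011, c111) =>
    (app "000" c000, app "100" c100, app "010" c010, app "110" c110,
     app "001" c001, app "101" c101, app "011" c011, app "111" c111)

def circjob_count_3q (counts : List (List (String × Int))) : List Int × List Int × List Int × List Int × List Int × List Int × List Int × List Int :=
  counts.foldl pvStepA ([], [], [], [], [], [], [], [])

-- ===== PORT B =====
-- len(k) == 3 and set(k) <= {'0', '1'}
def pvValidKey (k : String) : Bool :=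
  PySem.Str.len k == 3 && k.toList.all (fun c => c == '0' || c == '1')

-- int(k[::-1], 2); the guard guarantees the parse succeeds, so .getD 0 is never the default
def pvIdxOf (k : String) : Int :=
  (PySem.Int.ofCharsBase? k.toList.reverse 2).getD 0

-- the inner loop body: row[int(k[::-1], 2)] = v  (guarded)
def pvScatter (row : List Int) (p : String × Int) : List Int :=
  if pvValidKey p.1 then PySem.List.pySetD row (pvIdxOf p.1) p.2 else row

-- row_of(d)
def pvRowOf (dl : List (String × Int)) : List Int :=
  (PySem.Dict.ofList dl).items.foldl pvScatter (List.replicate 8 0)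

-- [r[j] for r in rows]
def pvColB (rows : List (List Int)) (j : Int) : List Int :=
  rows.map (fun r => PySem.List.pyGetD r j 0)

def circjob_count_3q_alt (counts : List (List (String × Int))) : List Int × List Int × List Int × List Int × List Int × List Int × List Int × List Int :=
  let rows := counts.map pvRowOf
  (pvColB rows 0, pvColB rows 1, pvColB rows 2, pvColB rows 3,
   pvColB rows 4, pvColB rows 5, pvColB rows 6, pvColB rows 7)

-- ===== PRECONDITION & SPEC =====
def Spec_circjob_count_3q (counts : List (List (String × Int))) (out : List Int × List Int × List Int × List Int × List Int × List Int × List Int × List Int) : Prop := out = circjob_count_3q_alt counts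
instance (counts : List (List (String × Int))) (out : List Int × List Int × List Int × List Int × List Int × List Int × List Int × List Int) : Decidable (Spec_circjob_count_3q counts out) := by
  unfold Spec_circjob_count_3q
  letI d1 : DecidableEq (List Int) := inferInstance
  letI d2 : DecidableEq (List Int × List Int) := @instDecidableEqProd _ _ d1 d1
  letI d3 := @instDecidableEqProd _ _ d1 d2
  letI d4 := @instDecidableEqProd _ _ d1 d3
  letI d5 := @instDecidableEqProd _ _ d1 d4
  letI d6 := @instDecidableEqProd _ _ d1 d5
  letI d7 := @instDecidableEqProd _ _ d1 d6
  letI d8 := @instDecidableEqProd _ _ d1 d7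
  exact d8 _ _

-- ===== CLAIM (what is proved, stated in full; the proofs are below) =====
def Claim_equal_circjob_count_3q : Prop := ∀ (counts : List (List (String × Int))), Dom_circjob_count_3q counts → Spec_circjob_count_3q counts (circjob_count_3q counts)

-- ===== LEMMAS AND PROOFS =====

-- A's column as a map (proof-side characterisation)
def pvColA (k : String) (counts : List (List (String × Int))) : List Int :=
  counts.map (fun dl => (PySem.Dict.ofList dl).getD k 0)

-- slot j ↔ key: 0→"000", 1→"100", … (reversed binary)
def pvKeyOf (j : Nat) : String :=
  ["000", "100", "010", "110", "001", "101", "011", "111"].getD j ""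

-- A's conditional append always appends the getD value (absent key ⇒ getD = 0)
theorem pvApp_eq (d : PySem.Dict String Int) (k : String) (l : List Int) :
    (if d.contains k then l ++ [d.getD k 0] else l ++ [0]) = l ++ [d.getD k 0] := by
  by_cases h : d.contains k
  · simp [h]
  · simp only [Bool.not_eq_true] at h
    rw [PySem.Dict.getD_of_not_contains (h := h)]; simp [h]

-- loop invariant: folding A's step from any accumulators appends A's columns
theorem pvFoldA (counts : List (List (String × Int)))
    (a0 a1 a2 a3 a4 a5 a6 a7 : List Int) :
    counts.foldl pvStepA (a0, a1, a2, a3, a4, a5, a6, a7) =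
      (a0 ++ pvColA "000" counts, a1 ++ pvColA "100" counts, a2 ++ pvColA "010" counts,
       a3 ++ pvColA "110" counts, a4 ++ pvColA "001" counts, a5 ++ pvColA "101" counts,
       a6 ++ pvColA "011" counts, a7 ++ pvColA "111" counts) := by
  induction counts generalizing a0 a1 a2 a3 a4 a5 a6 a7 with
  | nil => simp [pvColA]
  | cons dl rest ih =>
    simp only [List.foldl_cons, pvStepA, pvApp_eq, ih, pvColA, List.map_cons]
    simp [List.append_assoc]

-- a valid key is one of the 8 bitstrings
theorem pvValid_cases (k : String) (h : pvValidKey k = true) :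
    k = "000" ∨ k = "100" ∨ k = "010" ∨ k = "110" ∨
    k = "001" ∨ k = "101" ∨ k = "011" ∨ k = "111" := by
  unfold pvValidKey at h
  simp only [Bool.and_eq_true, beq_iff_eq, List.all_eq_true, PySem.Str.len_eq] at h
  obtain ⟨hl, hc⟩ := h
  have hk := @String.ofList_toList k
  have h3 : k.toList.length = 3 := by omega
  match e : k.toList, h3 with
  | [a,b,c], _ =>
    have ha := hc a (by rw [e]; simp)
    have hb := hc b (by rw [e]; simp)
    have hcc := hc c (by rw [e]; simp)
    rw [e] at hk
    simp only [Bool.or_eq_true, beq_iff_eq] at ha hb hcc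
    rcases ha with ha|ha <;> rcases hb with hb|hb <;> rcases hcc with h2|h2 <;>
      subst ha hb h2 <;> rw [← hk] <;> simp
theorem pvKey_idx (j : Nat) (hj : j < 8) :
    pvValidKey (pvKeyOf j) = true ∧ pvIdxOf (pvKeyOf j) = (j : Int) := by
  interval_cases j <;> exact ⟨by decide, by decide⟩
theorem pvIdx_inj (k : String) (hv : pvValidKey k = true) (j : Nat) (hj : j < 8)
    (hne : k ≠ pvKeyOf j) : pvIdxOf k ≠ (j : Int) := by
  rcases pvValid_cases k hv with rfl|rfl|rfl|rfl|rfl|rfl|rfl|rfl <;>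
    interval_cases j <;> revert hne <;> decide
theorem pvIdx_range (k : String) (hv : pvValidKey k = true) :
    (0:Int) ≤ pvIdxOf k ∧ pvIdxOf k < 8 := by
  rcases pvValid_cases k hv with rfl|rfl|rfl|rfl|rfl|rfl|rfl|rfl <;> exact ⟨by decide, by decide⟩
theorem pvScatter_length (row : List Int) (p : String × Int) :
    (pvScatter row p).length = row.length := by
  unfold pvScatter
  split_ifs <;> simp [PySem.List.length_pySetD]
theorem pvScatter_slot (items : List (String × Int)) (hnd : (items.map Prod.fst).Nodup)
    (row : List Int) (hlen : row.length = 8) (j : Nat) (hj : j < 8) :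
    (items.foldl pvScatter row).getD j 0 =
      match items.find? (fun p => p.1 == pvKeyOf j) with
      | some p => p.2
      | none => row.getD j 0 := by
  induction items generalizing row with
  | nil => simp
  | cons p rest ih =>
    simp only [List.map_cons, List.nodup_cons] at hnd
    obtain ⟨hnotin, hndr⟩ := hnd
    have hlen' : (pvScatter row p).length = 8 := by rw [pvScatter_length]; exact hlen
    rw [List.foldl_cons, ih hndr _ hlen']
    by_cases heq : p.1 = pvKeyOf j
    · -- head matches: its write survives (no later item has this key)
      have hfind : rest.find? (fun q => q.1 == pvKeyOf j) = none := by
        rw [List.find?_eq_none]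
        intro q hq hbeq
        exact hnotin (by rw [← heq] at hbeq; simp only [beq_iff_eq] at hbeq
                         rw [← hbeq]; exact List.mem_map_of_mem hq)
      rw [hfind, List.find?_cons_of_pos (by simp [heq])]
      have hv : pvValidKey p.1 = true := by rw [heq]; exact (pvKey_idx j hj).1
      have hidx : pvIdxOf p.1 = (j : Int) := by rw [heq]; exact (pvKey_idx j hj).2
      simp only [pvScatter, hv, if_true, hidx]
      rw [PySem.List.pySetD_natCast]
      simp [List.getD_eq_getElem?_getD, hlen, hj]
    · -- head does not match slot j
      rw [List.find?_cons_of_neg (by simp [heq])]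
      congr 1
      unfold pvScatter
      split_ifs with hv
      · have hne := pvIdx_inj p.1 hv j hj heq
        have h0 : (0:Int) ≤ pvIdxOf p.1 := (pvIdx_range p.1 hv).1
        rw [PySem.List.pySetD_of_nonneg _ _ h0]
        rw [List.getD_eq_getElem?_getD, List.getD_eq_getElem?_getD,
            List.getElem?_set_ne]
        omega
      · rfl

-- helper: the inner fold writes slot j at most once (nodup keys), so it equals the first match
theorem pvRowOf_getD (dl : List (String × Int)) (j : Nat) (hj : j < 8) :
    (pvRowOf dl).getD j 0 = (PySem.Dict.ofList dl).getD (pvKeyOf j) 0 := by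
  unfold pvRowOf
  have hnd : ((PySem.Dict.ofList dl).items.map Prod.fst).Nodup := PySem.Dict.nodup_keys_ofList dl
  rw [pvScatter_slot _ hnd _ (by simp) j hj]
  cases hfind : (PySem.Dict.ofList dl).items.find? (fun p => p.1 == pvKeyOf j) with
  | some p =>
    have hm := List.mem_of_find?_eq_some hfind
    have hk := List.find?_some hfind
    simp only [beq_iff_eq] at hk
    have : ((pvKeyOf j, p.2) : String × Int) ∈ (PySem.Dict.ofList dl).items := by
      rw [← hk]; exact hm
    exact (PySem.Dict.getD_of_mem_items _ this (by simpa [PySem.Dict.keys] using hnd) 0).symm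
  | none =>
    have hnk : pvKeyOf j ∉ (PySem.Dict.ofList dl).keys := by
      intro hmem
      simp only [PySem.Dict.keys] at hmem
      obtain ⟨p, hp, hpk⟩ := List.mem_map.mp hmem
      have := List.find?_eq_none.mp hfind p hp
      simp [hpk] at this
    have hc : (PySem.Dict.ofList dl).contains (pvKeyOf j) = false := by
      by_contra h
      exact hnk ((PySem.Dict.contains_iff_mem_keys _ _).mp (by simpa using h))
    rw [PySem.Dict.getD_of_not_contains (h := hc)]
    interval_cases j <;> rfl

-- hence B's column j is A's column at key pvKeyOf j
theorem pvColB_eq (counts : List (List (String × Int))) (j : Nat) (hj : j < 8) :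
    pvColB (counts.map pvRowOf) (j : Int) = pvColA (pvKeyOf j) counts := by
  unfold pvColB pvColA
  rw [List.map_map]
  refine List.map_congr_left (fun dl _ => ?_)
  simp only [Function.comp_apply, PySem.List.pyGetD_natCast]
  exact pvRowOf_getD dl j hj

-- ===== VERDICT (by name: the statement is the Claim_ definition above) =====
theorem circjob_count_3q_spec : Claim_equal_circjob_count_3q := by
  intro counts _
  unfold Spec_circjob_count_3q circjob_count_3q circjob_count_3q_alt
  rw [pvFoldA]
  simp only [List.nil_append]
  have h := fun j hj => pvColB_eq counts j hj
  refine Prod.ext ?_ (Prod.ext ?_ (Prod.ext ?_ (Prod.ext ?_ (Prod.ext ?_ (Prod.ext ?_ (Prod.ext ?_ ?_))))))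
  all_goals simp only []
  · exact (h 0 (by omega)).symm
  · exact (h 1 (by omega)).symm
  · exact (h 2 (by omega)).symm
  · exact (h 3 (by omega)).symm
  · exact (h 4 (by omega)).symm
  · exact (h 5 (by omega)).symm
  · exact (h 6 (by omega)).symm
  · exact (h 7 (by omega)).symm
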